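-- pv_equiv track=rewrite | github.com/estudiowebpin1978/quiniela-ia | quiniela_analisis.py | analisis_secuenciales
-- ===== SOURCE A (Python) =====
-- from collections import Counter
--
-- def analisis_secuenciales(secuencias):
--     """Análisis de qué números siguen a otros"""
--     transiciones = {}
--
--     for s in secuencias:
--         seq = s['secuencia']
--         for i in range(len(seq) - 1):
--             actual = seq[i]
--             siguiente = seq[i + 1]
--             if actual not in transiciones:
--                 transiciones[actual] = []
--             transiciones[actual].append(siguiente)
--
--     # Contar transiciones más comunes
--     resultados = {}
--     for num, sigs in transiciones.items():
--         contador = Counter(sigs)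
--         resultados[num] = dict(contador.most_common(10))
--
--     return resultados
-- ===== SOURCE B (Python) =====
-- def analisis_secuenciales(secuencias):
--     """Análisis de qué números siguen a otros"""
--     # Staged brute-force: flatten ALL adjacent transitions into one flat pair
--     # list, then answer each distinct starting number by scanning that list.
--     pares = []
--     for s in secuencias:
--         seq = s['secuencia']
--         pares.extend(zip(seq, seq[1:]))
--
--     resultados = {}
--     for num in dict.fromkeys(a for a, _ in pares):
--         sigs = [b for a, b in pares if a == num]
--         items = [(b, sigs.count(b)) for b in dict.fromkeys(sigs)]
--         resultados[num] = dict(sorted(items, key=lambda kv: kv[1], reverse=True)[:10])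
--     return resultados
-- ===== Notes on version B (the rewrite author's own statement) =====
-- stated objective: alternative
-- what changed: B drops A's incrementally-grown dict-of-successor-lists and per-key Counter: it flattens all adjacent transitions into one flat pair list, dedups the starting numbers, and answers each number by re-scanning that flat list with filters and list.count (brute-force staged scans instead of hash grouping), then the same stable descending sort truncated to 10.
import Mathlib
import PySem

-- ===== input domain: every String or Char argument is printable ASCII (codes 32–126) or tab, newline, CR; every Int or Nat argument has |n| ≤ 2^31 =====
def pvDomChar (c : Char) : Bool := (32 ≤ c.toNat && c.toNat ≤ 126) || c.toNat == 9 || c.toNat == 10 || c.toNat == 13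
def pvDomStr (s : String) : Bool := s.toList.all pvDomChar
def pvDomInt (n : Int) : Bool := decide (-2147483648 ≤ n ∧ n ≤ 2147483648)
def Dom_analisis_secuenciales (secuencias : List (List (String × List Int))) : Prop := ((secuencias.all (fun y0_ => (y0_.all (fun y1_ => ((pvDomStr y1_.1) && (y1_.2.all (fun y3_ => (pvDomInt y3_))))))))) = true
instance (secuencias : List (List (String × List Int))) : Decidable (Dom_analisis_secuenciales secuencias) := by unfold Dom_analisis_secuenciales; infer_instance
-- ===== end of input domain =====

-- B replaces A's incrementally grown dict of successor lists + per-key Counter with staged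
-- brute-force scans over one flat list of all adjacent pairs (objective: alternative, not faster).

-- ===== PORT A =====
-- Port of A: build dict num -> list of successors while scanning, then Counter + most_common(10)
-- per number (most_common(10) = stable descending sort of the counter's items, truncated to 10).
def analisis_secuenciales (secuencias : List (List (String × List Int))) : List (Int × List (Int × Int)) :=
  let transiciones : PySem.Dict Int (List Int) :=
    secuencias.foldl (fun t s =>
      let seq := (PySem.Dict.mk s).getD "secuencia" []   -- s['secuencia']; KeyError excluded by Pre_
      (PySem.List.pyRange 0 ((seq.length : Int) - 1)).foldl (fun t i =>
        let actual := PySem.List.pyGetD seq i 0          -- indices are always in range here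
        let siguiente := PySem.List.pyGetD seq (i + 1) 0
        let t := if t.contains actual then t else t.insert actual []
        t.insert actual (t.getD actual [] ++ [siguiente])) t) PySem.Dict.empty
  let resultados : PySem.Dict Int (List (Int × Int)) :=
    transiciones.items.foldl (fun r p =>
      let contador := PySem.Dict.counter p.2
      r.insert p.1 ((PySem.List.sorted contador.items (fun kv => kv.2) true).take 10)) PySem.Dict.empty
  resultados.items

-- ===== PORT B =====
-- Port of B: flatten all adjacent pairs (zip(seq, seq[1:])) into 'pares', then for each distinct
-- starting number (dict.fromkeys = PySem.List.dedup) scan 'pares' with filter and list.count.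
def analisis_secuenciales_alt (secuencias : List (List (String × List Int))) : List (Int × List (Int × Int)) :=
  let pares : List (Int × Int) :=
    secuencias.foldl (fun acc s =>
      let seq := (PySem.Dict.mk s).getD "secuencia" []   -- s['secuencia']; KeyError excluded by Pre_
      acc ++ seq.zip (seq.drop 1)) []
  let resultados : PySem.Dict Int (List (Int × Int)) :=
    (PySem.List.dedup (pares.map (·.1))).foldl (fun r num =>
      let sigs := (pares.filter (fun p => p.1 == num)).map (·.2)
      let items := (PySem.List.dedup sigs).map (fun b => (b, (sigs.count b : Int)))
      r.insert num ((PySem.List.sorted items (fun kv => kv.2) true).take 10)) PySem.Dict.empty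
  resultados.items

-- ===== PRECONDITION & SPEC =====
-- Pre_ excludes exactly the inputs where some element dict lacks the key 'secuencia': there A (and B)
-- raise KeyError and return nothing.
def Pre_analisis_secuenciales (secuencias : List (List (String × List Int))) : Prop :=
  ∀ s ∈ secuencias, (PySem.Dict.mk s).contains "secuencia" = true
instance (secuencias : List (List (String × List Int))) : Decidable (Pre_analisis_secuenciales secuencias) := by
  unfold Pre_analisis_secuenciales; infer_instance

def pvWitness_analisis_secuenciales : (List (List (String × List Int))) :=
  [[("secuencia", [1, 2, 1, 2, 3])], [("secuencia", [2, 1])]]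

def Spec_analisis_secuenciales (secuencias : List (List (String × List Int))) (out : List (Int × List (Int × Int))) : Prop := out = analisis_secuenciales_alt secuencias
instance (secuencias : List (List (String × List Int))) (out : List (Int × List (Int × Int))) : Decidable (Spec_analisis_secuenciales secuencias out) := by unfold Spec_analisis_secuenciales; infer_instance

-- ===== CLAIM =====
def Claim_equal_analisis_secuenciales : Prop := ∀ (secuencias : List (List (String × List Int))), Dom_analisis_secuenciales secuencias → Pre_analisis_secuenciales secuencias → Spec_analisis_secuenciales secuencias (analisis_secuenciales secuencias)

-- ===== LEMMAS AND PROOFS =====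

-- named (defeq) forms of the loop pieces
def seqOf (s : List (String × List Int)) : List Int := (PySem.Dict.mk s).getD "secuencia" []

def aIdxStep (seq : List Int) (t : PySem.Dict Int (List Int)) (i : Int) : PySem.Dict Int (List Int) :=
  (if t.contains (PySem.List.pyGetD seq i 0) then t else t.insert (PySem.List.pyGetD seq i 0) []).insert
    (PySem.List.pyGetD seq i 0)
    ((if t.contains (PySem.List.pyGetD seq i 0) then t
      else t.insert (PySem.List.pyGetD seq i 0) []).getD (PySem.List.pyGetD seq i 0) []
      ++ [PySem.List.pyGetD seq (i + 1) 0])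

def aPairStep (t : PySem.Dict Int (List Int)) (p : Int × Int) : PySem.Dict Int (List Int) :=
  t.insert p.1 (t.getD p.1 [] ++ [p.2])

-- the flat list of all adjacent pairs
def pares (secuencias : List (List (String × List Int))) : List (Int × Int) :=
  secuencias.flatMap (fun s => (seqOf s).zip ((seqOf s).drop 1))

-- A's conditional initialisation followed by the append is a single insert
theorem aIdxStep_eq (seq : List Int) (t : PySem.Dict Int (List Int)) (i : Int) :
    aIdxStep seq t i = aPairStep t (PySem.List.pyGetD seq i 0, PySem.List.pyGetD seq (i + 1) 0) := by
  unfold aIdxStep aPairStep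
  by_cases h : t.contains (PySem.List.pyGetD seq i 0)
  · simp [h]
  · have h' : t.contains (PySem.List.pyGetD seq i 0) = false := by simpa using h
    rw [if_neg (by simp [h']), PySem.Dict.getD_insert_self, PySem.Dict.insert_insert_self,
      PySem.Dict.getD_of_not_contains t [] h']

-- the adjacent pairs, at the level of Nat indices
theorem range_pairs_nat (xs : List Int) :
    (List.range (xs.length - 1)).map (fun i => (xs.getD i 0, xs.getD (i + 1) 0)) = xs.zip (xs.drop 1) := by
  induction xs with
  | nil => rfl
  | cons x xs ih =>
    cases xs with
    | nil => rfl
    | cons y t =>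
      have hlen : (x :: y :: t).length - 1 = ((y :: t).length - 1) + 1 := by simp
      rw [hlen, List.range_succ_eq_map, List.map_cons, List.map_map]
      have htail : ∀ i ∈ List.range ((y :: t).length - 1),
          ((fun i => ((x :: y :: t).getD i 0, (x :: y :: t).getD (i + 1) 0)) ∘ Nat.succ) i
            = (fun i => ((y :: t).getD i 0, (y :: t).getD (i + 1) 0)) i := fun i _ => rfl
      rw [List.map_congr_left htail, ih]
      rfl

-- A's index loop enumerates exactly the adjacent pairs zip(seq, seq[1:])
theorem range_pairs (seq : List Int) :
    (PySem.List.pyRange 0 ((seq.length : Int) - 1)).map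
        (fun i => (PySem.List.pyGetD seq i 0, PySem.List.pyGetD seq (i + 1) 0))
      = seq.zip (seq.drop 1) := by
  cases hs : seq with
  | nil => rfl
  | cons x xs =>
    have h1 : (((x :: xs).length : Int) - 1) = (((x :: xs).length - 1 : Nat) : Int) := by
      simp
    rw [h1, PySem.List.pyRange_zero_natCast, List.map_map]
    have hfun : ∀ i ∈ List.range ((x :: xs).length - 1),
        ((fun i => (PySem.List.pyGetD (x :: xs) i 0, PySem.List.pyGetD (x :: xs) (i + 1) 0))
            ∘ (fun k : Nat => (k : Int))) i
          = (fun i : Nat => ((x :: xs).getD i 0, (x :: xs).getD (i + 1) 0)) i := by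
      intro i _
      simp only [Function.comp_apply]
      rw [show ((i : Nat) : Int) + 1 = ((i + 1 : Nat) : Int) by push_cast; ring]
      rw [PySem.List.pyGetD_natCast, PySem.List.pyGetD_natCast]
    rw [List.map_congr_left hfun, range_pairs_nat]

-- A's nested loops = one fold of aPairStep over the flat pair list
theorem aPhase1_eq (secuencias : List (List (String × List Int))) (t : PySem.Dict Int (List Int)) :
    secuencias.foldl (fun t s =>
        (PySem.List.pyRange 0 (((seqOf s).length : Int) - 1)).foldl (aIdxStep (seqOf s)) t) t
      = (pares secuencias).foldl aPairStep t := by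
  induction secuencias generalizing t with
  | nil => rfl
  | cons s ss ih =>
    rw [List.foldl_cons, ih]
    unfold pares
    rw [List.flatMap_cons, List.foldl_append]
    congr 1
    rw [← range_pairs (seqOf s), List.foldl_map]
    exact PySem.List.foldl_congr_mem _ _ _ _ (fun t i _ => aIdxStep_eq (seqOf s) t i)

-- lookup in the grouping dict: exactly the successors of k in the flat pair list
theorem getD_foldl_aPairStep (ps : List (Int × Int)) (d : PySem.Dict Int (List Int)) (k : Int) :
    (ps.foldl aPairStep d).getD k [] = d.getD k [] ++ (ps.filter (fun p => p.1 == k)).map (·.2) := by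
  induction ps generalizing d with
  | nil => simp
  | cons p ps ih =>
    rw [List.foldl_cons, ih]
    by_cases h : k = p.1
    · simp [aPairStep, h, PySem.Dict.getD_insert_self]
    · have hb : (p.1 == k) = false := by
        simp only [beq_eq_false_iff_ne, ne_eq]; exact fun hh => h hh.symm
      simp [aPairStep, PySem.Dict.getD_insert, h, hb]

theorem keys_foldl_aPairStep (ps : List (Int × Int)) :
    (ps.foldl aPairStep PySem.Dict.empty).keys = PySem.List.dedup (ps.map (·.1)) := by
  rw [show aPairStep = (fun t (p : Int × Int) => t.insert p.1 (t.getD p.1 [] ++ [p.2])) from rfl,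
    PySem.Dict.keys_foldl_insert_key]
  simp [PySem.Dict.keys_empty, PySem.List.dedup_eq_ofList, PySem.Set.update, PySem.Set.ofList_eq_foldl]

theorem nodup_keys_foldl_aPairStep (ps : List (Int × Int)) :
    (ps.foldl aPairStep PySem.Dict.empty).keys.Nodup :=
  PySem.Dict.nodup_keys_foldl_insert_key ps (·.1) _ _ PySem.Dict.nodup_keys_empty

-- ===== VERDICT =====
theorem analisis_secuenciales_spec : Claim_equal_analisis_secuenciales := by
  intro secuencias _ _
  show analisis_secuenciales secuencias = analisis_secuenciales_alt secuencias
  show ((secuencias.foldl (fun t s =>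
          (PySem.List.pyRange 0 (((seqOf s).length : Int) - 1)).foldl (aIdxStep (seqOf s)) t)
        PySem.Dict.empty).items.foldl (fun r p =>
          r.insert p.1 ((PySem.List.sorted (PySem.Dict.counter p.2).items (fun kv => kv.2) true).take 10))
        PySem.Dict.empty).items
     = (let ps := secuencias.foldl (fun acc s => acc ++ (seqOf s).zip ((seqOf s).drop 1)) [];
        ((PySem.List.dedup (ps.map (·.1))).foldl (fun r num =>
          r.insert num ((PySem.List.sorted
            ((PySem.List.dedup ((ps.filter (fun p => p.1 == num)).map (·.2))).map
              (fun b => (b, (((ps.filter (fun p => p.1 == num)).map (·.2)).count b : Int))))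
            (fun kv => kv.2) true).take 10)) PySem.Dict.empty).items)
  have hB : secuencias.foldl (fun acc s => acc ++ (seqOf s).zip ((seqOf s).drop 1)) []
      = pares secuencias := by
    rw [PySem.List.foldl_append_eq_flatMap]; rfl
  rw [aPhase1_eq, hB]
  show _ = ((PySem.List.dedup ((pares secuencias).map (·.1))).foldl (fun r num =>
      r.insert num ((PySem.List.sorted
        ((PySem.List.dedup (((pares secuencias).filter (fun p => p.1 == num)).map (·.2))).map
          (fun b => (b, ((((pares secuencias).filter (fun p => p.1 == num)).map (·.2)).count b : Int))))
        (fun kv => kv.2) true).take 10)) PySem.Dict.empty).items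
  -- A's items are the deduped starting numbers paired with their successor lists
  have hitems : ((pares secuencias).foldl aPairStep PySem.Dict.empty).items
      = (PySem.List.dedup ((pares secuencias).map (·.1))).map
        (fun k => (k, ((pares secuencias).filter (fun p => p.1 == k)).map (·.2))) := by
    rw [PySem.Dict.items_eq_map_keys _ (nodup_keys_foldl_aPairStep _) [], keys_foldl_aPairStep]
    exact List.map_congr_left (fun k _ => by rw [getD_foldl_aPairStep]; rfl)
  have hnodA : (((pares secuencias).foldl aPairStep PySem.Dict.empty).items.map
      (fun p : Int × List Int => p.1)).Nodup := by
    simpa [PySem.Dict.keys] using nodup_keys_foldl_aPairStep (pares secuencias)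
  rw [PySem.Dict.items_foldl_insert_fresh (k := fun p : Int × List Int => p.1)
      (v := fun p => ((PySem.List.sorted (PySem.Dict.counter p.2).items (fun kv => kv.2) true).take 10))
      _ PySem.Dict.empty (fun a _ => PySem.Dict.contains_empty _) hnodA,
    PySem.Dict.items_foldl_insert_fresh (k := fun k : Int => k)
      (v := fun num => ((PySem.List.sorted
        ((PySem.List.dedup (((pares secuencias).filter (fun p => p.1 == num)).map (·.2))).map
          (fun b => (b, ((((pares secuencias).filter (fun p => p.1 == num)).map (·.2)).count b : Int))))
        (fun kv => kv.2) true).take 10))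
      _ PySem.Dict.empty (fun a _ => PySem.Dict.contains_empty _)
      (by simp)]
  rw [hitems, List.map_map]
  refine congrArg _ (List.map_congr_left (fun k _ => ?_))
  simp only [Function.comp_apply]
  rw [PySem.Dict.items_counter, PySem.List.dedup_eq_ofList]
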